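-- pv_equiv track=rewrite | github.com/sathish86/workspace_python | technically_compatible.py | stop_on_duplicate
-- ===== SOURCE A (Python) =====
-- class Duplication(Exception):
--     pass
--
-- def stop_on_duplicate(text):
--
--     last = None
--     result = []
--
--     try:
--         for letter in text:
--             if letter == last:
--                 raise Duplication()
--             last = letter
--             result.append(letter)
--
--     except Duplication:
--         pass
--     else:
--         result.append("OK")
--     finally:
--         result.append("STOP")
--     return result
-- ===== SOURCE B (Python) =====
-- def stop_on_duplicate(text):
--     chars = list(text)
--     cut = len(chars)
--     for i, (x, y) in enumerate(zip(chars, chars[1:])):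
--         if x == y:
--             cut = i + 1
--             break
--     result = chars[:cut]
--     if cut == len(chars):
--         result.append("OK")
--     result.append("STOP")
--     return result
-- ===== Notes on version B (the rewrite author's own statement) =====
-- stated objective: simpler
-- what changed: Replaces the exception-driven incremental append loop (raise Duplication inside try/except/else/finally) with a two-phase scan: find the first adjacent-duplicate cut index over zipped neighbour pairs, then slice the prefix and append the markers.
import Mathlib
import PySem

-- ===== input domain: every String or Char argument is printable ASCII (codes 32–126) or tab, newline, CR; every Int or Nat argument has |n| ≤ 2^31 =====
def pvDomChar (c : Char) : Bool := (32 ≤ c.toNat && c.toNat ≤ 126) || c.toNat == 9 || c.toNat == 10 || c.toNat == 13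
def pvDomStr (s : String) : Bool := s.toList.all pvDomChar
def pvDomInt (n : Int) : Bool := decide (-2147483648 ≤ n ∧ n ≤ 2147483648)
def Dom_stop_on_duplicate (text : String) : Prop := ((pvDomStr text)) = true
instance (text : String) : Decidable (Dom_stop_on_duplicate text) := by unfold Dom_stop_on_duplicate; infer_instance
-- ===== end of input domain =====

-- B replaces A's exception-driven incremental loop with a find-cut-index-then-slice decomposition (same cost, simpler control flow).


-- ===== PORT A =====
-- the try/for loop: `last` starts as None; on `letter == last` the Duplication
-- exception skips the "OK" append (except-pass), the finally appends "STOP".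
def stopA_go (last : Option Char) (result : List String) : List Char → List String
  | [] => (result ++ ["OK"]) ++ ["STOP"]
  | c :: rest =>
    if some c == last then result ++ ["STOP"]
    else stopA_go (some c) (result ++ [String.ofList [c]]) rest

def stop_on_duplicate (text : String) : List String :=
  stopA_go none [] text.toList

-- ===== PORT B =====
-- scan zipped neighbour pairs for the first adjacent duplicate (default cut = len)
def stopB_findCut (dflt : Nat) : Nat → List (Char × Char) → Nat
  | _, [] => dflt
  | i, (x, y) :: rest => if x == y then i + 1 else stopB_findCut dflt (i + 1) rest

def stop_on_duplicate_alt (text : String) : List String :=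
  let chars := text.toList
  let cut := stopB_findCut chars.length 0 (chars.zip chars.tail)
  -- chars[:cut] with cut : Nat is exactly List.take
  let result := (chars.take cut).map (fun c => String.ofList [c])
  (if cut = chars.length then result ++ ["OK"] else result) ++ ["STOP"]

-- ===== PRECONDITION & SPEC =====
def Spec_stop_on_duplicate (text : String) (out : List String) : Prop := out = stop_on_duplicate_alt text
instance (text : String) (out : List String) : Decidable (Spec_stop_on_duplicate text out) := by unfold Spec_stop_on_duplicate; infer_instance

-- ===== CLAIM (what is proved, stated in full; the proofs are below) =====
def Claim_equal_stop_on_duplicate : Prop := ∀ (text : String), Dom_stop_on_duplicate text → Spec_stop_on_duplicate text (stop_on_duplicate text)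

-- ===== LEMMAS AND PROOFS =====

-- length of text taken from `rest` after a known previous char
def cutAux (prev : Char) : List Char → Nat
  | [] => 0
  | y :: rs => if y == prev then 0 else 1 + cutAux y rs

lemma findCut_eq (rest : List Char) : ∀ (prev : Char) (i d : Nat),
    stopB_findCut d i ((prev :: rest).zip rest) =
      if cutAux prev rest = rest.length then d else i + 1 + cutAux prev rest := by
  induction rest with
  | nil => intro prev i d; simp [stopB_findCut, cutAux]
  | cons y rs ih =>
    intro prev i d
    by_cases h : (prev == y) = true
    · have hy : (y == prev) = true := by
        have := eq_of_beq h; simp [this]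
      simp [List.zip_cons_cons, stopB_findCut, cutAux, h, hy]
    · have h' : (y == prev) = false := by
        rw [beq_eq_false_iff_ne]; intro e; exact h (by simp [e])
      simp only [List.zip_cons_cons, stopB_findCut, h, cutAux, h', Bool.false_eq_true,
        if_false]
      rw [ih y (i + 1) d]
      by_cases hc : cutAux y rs = rs.length
      · have hlen : 1 + cutAux y rs = (y :: rs).length := by simp; omega
        rw [if_pos hc, if_pos hlen]
      · have hlen : ¬ (1 + cutAux y rs = (y :: rs).length) := by simp; omega
        rw [if_neg hc, if_neg hlen]; omega

lemma goA_eq (rest : List Char) : ∀ (prev : Char) (acc : List String),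
    stopA_go (some prev) acc rest =
      ((if cutAux prev rest = rest.length
         then acc ++ (rest.take (cutAux prev rest)).map (fun c => String.ofList [c]) ++ ["OK"]
         else acc ++ (rest.take (cutAux prev rest)).map (fun c => String.ofList [c])) ++ ["STOP"]) := by
  induction rest with
  | nil => intro prev acc; simp [stopA_go, cutAux]
  | cons y rs ih =>
    intro prev acc
    by_cases h : (y == prev) = true
    · have hy : (some y == some prev) = true := by simp_all
      simp [stopA_go, hy, cutAux, h]
    · have hy : (some y == some prev) = false := by simp_all
      simp only [stopA_go, hy, Bool.false_eq_true, if_false, cutAux, h]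
      rw [ih y (acc ++ [String.ofList [y]])]
      have htake : List.take (1 + cutAux y rs) (y :: rs) = y :: List.take (cutAux y rs) rs := by
        rw [Nat.add_comm]; simp [List.take_succ_cons]
      by_cases hc : cutAux y rs = rs.length
      · have hlen : 1 + cutAux y rs = (y :: rs).length := by simp; omega
        rw [if_pos hc, if_pos hlen, htake]; simp
      · have hlen : ¬ (1 + cutAux y rs = (y :: rs).length) := by simp; omega
        rw [if_neg hc, if_neg hlen, htake]; simp

lemma main_eq (cs : List Char) :
    stopA_go none [] cs =
      (let cut := stopB_findCut cs.length 0 (cs.zip cs.tail)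
       let result := (cs.take cut).map (fun c => String.ofList [c])
       (if cut = cs.length then result ++ ["OK"] else result) ++ ["STOP"]) := by
  cases cs with
  | nil => simp [stopA_go, stopB_findCut]
  | cons c rest =>
    have hstep : stopA_go none [] (c :: rest)
        = stopA_go (some c) [String.ofList [c]] rest := by
      simp [stopA_go]
    rw [hstep, goA_eq rest c [String.ofList [c]]]
    simp only [List.tail_cons, findCut_eq rest c 0 (c :: rest).length]
    by_cases hc : cutAux c rest = rest.length
    · have h1 : (c :: rest).length = (c :: rest).length := rfl
      simp [hc, List.take_succ_cons]
    · have h2 : ¬ (0 + 1 + cutAux c rest = (c :: rest).length) := by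
        simp [List.length_cons]; omega
      simp [hc, List.take_succ_cons, Nat.add_comm]

-- ===== VERDICT (by name: the statement is the Claim_ definition above) =====
theorem stop_on_duplicate_spec : Claim_equal_stop_on_duplicate := by
  intro text _
  unfold Spec_stop_on_duplicate stop_on_duplicate stop_on_duplicate_alt
  exact main_eq text.toList
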